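-- pv_equiv track=rewrite | github.com/kshitij2605/FlashParse | src/glm_hybrid_ocr/utils/text_utils.py | deduplicate_repeated_lines
-- ===== SOURCE A (Python) =====
-- def deduplicate_repeated_lines(text: str, threshold: int = 3) -> str:
--     """Remove lines that repeat more than `threshold` times consecutively."""
--     lines = text.split("\n")
--     result = []
--     count = 1
--     for i, line in enumerate(lines):
--         if i > 0 and line == lines[i - 1]:
--             count += 1
--         else:
--             count = 1
--         if count <= threshold:
--             result.append(line)
--     return "\n".join(result)
-- ===== SOURCE B (Python) =====
-- from itertools import groupby
--
--
-- def deduplicate_repeated_lines(text: str, threshold: int = 3) -> str: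
--     """Remove lines that repeat more than `threshold` times consecutively."""
--     result = []
--     for key, group in groupby(text.split("\n")):
--         run_length = sum(1 for _ in group)
--         result.extend([key] * min(run_length, threshold))
--     return "\n".join(result)
-- ===== Notes on version B (the rewrite author's own statement) =====
-- stated objective: idiomatic
-- what changed: Replaces the per-line counter with an index lookup into lines[i-1] by an itertools.groupby pass over whole consecutive runs, emitting min(run_length, threshold) copies of each run's line.
import Mathlib
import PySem

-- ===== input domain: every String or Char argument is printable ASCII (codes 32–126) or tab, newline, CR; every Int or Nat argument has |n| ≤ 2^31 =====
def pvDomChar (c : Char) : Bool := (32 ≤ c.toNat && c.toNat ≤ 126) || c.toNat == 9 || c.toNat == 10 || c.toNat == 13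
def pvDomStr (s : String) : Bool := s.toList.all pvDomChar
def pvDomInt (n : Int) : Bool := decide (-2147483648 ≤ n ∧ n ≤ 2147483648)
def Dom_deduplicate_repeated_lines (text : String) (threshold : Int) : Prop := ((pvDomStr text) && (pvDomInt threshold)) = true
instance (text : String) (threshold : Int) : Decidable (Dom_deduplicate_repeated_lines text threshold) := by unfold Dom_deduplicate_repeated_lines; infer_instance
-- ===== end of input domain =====

-- B replaces A's per-line counter with an index lookup into lines[i-1] by an itertools.groupby
-- pass over whole consecutive runs, emitting min(run_length, threshold) copies of each run's line
-- (objective: idiomatic; same cost).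

-- ===== PORT A =====
-- text.split("\n"): the separator is the nonempty literal "\n", so Str.split? is always `some`
def pvSplitLines (text : String) : List String := (PySem.Str.split? text "\n").getD []

-- A's loop body ('if i > 0 and line == lines[i-1]: count += 1 else count = 1; if count <= threshold: result.append(line)')
def pvStepA (lines : List String) (threshold : Int) (st : List String × Int) (p : Int × String) : List String × Int :=
  let count : Int := if 0 < p.1 ∧ PySem.List.pyGet? lines (p.1 - 1) = some p.2 then st.2 + 1 else 1
  if count ≤ threshold then (st.1 ++ [p.2], count) else (st.1, count)

def deduplicate_repeated_lines (text : String) (threshold : Int) : String :=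
  let lines := pvSplitLines text
  let st := (PySem.List.enumerate lines).foldl (pvStepA lines threshold) ([], 1)
  PySem.Str.join "\n" st.1

-- ===== PORT B =====
-- itertools.groupby over the lines: each consecutive run as (key, run_length)
def pvRuns : List String → List (String × Nat)
  | [] => []
  | x :: xs =>
      (x, (xs.takeWhile (· == x)).length + 1) :: pvRuns (xs.dropWhile (· == x))
  termination_by l => l.length
  decreasing_by
    simp only [List.length_cons]
    have := List.length_dropWhile_le (p := (· == x)) (l := xs)
    omega

def deduplicate_repeated_lines_alt (text : String) (threshold : Int) : String :=
  let result := (pvRuns (pvSplitLines text)).foldl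
    (fun acc p => acc ++ List.replicate (min (p.2 : Int) threshold).toNat p.1) []
  PySem.Str.join "\n" result

-- ===== PRECONDITION & SPEC =====
def Spec_deduplicate_repeated_lines (text : String) (threshold : Int) (out : String) : Prop := out = deduplicate_repeated_lines_alt text threshold
instance (text : String) (threshold : Int) (out : String) : Decidable (Spec_deduplicate_repeated_lines text threshold out) := by unfold Spec_deduplicate_repeated_lines; infer_instance

-- ===== CLAIM (what is proved, stated in full; the proofs are below) =====
def Claim_equal_deduplicate_repeated_lines : Prop := ∀ (text : String) (threshold : Int), Dom_deduplicate_repeated_lines text threshold → Spec_deduplicate_repeated_lines text threshold (deduplicate_repeated_lines text threshold)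

-- ===== LEMMAS AND PROOFS =====

-- A's loop after the first line, as a structural recursion carrying (previous line, count)
def pvGo (thr : Int) : String → Int → List String → List String
  | _, _, [] => []
  | prev, c, x :: xs =>
      let c' : Int := if x = prev then c + 1 else 1
      (if c' ≤ thr then [x] else []) ++ pvGo thr x c' xs

-- B's output list, in flatMap form
def pvFlat (thr : Int) (rs : List (String × Nat)) : List String :=
  rs.flatMap (fun p => List.replicate (min (p.2 : Int) thr).toNat p.1)

lemma pvRepArith (thr c : Int) (L : Nat) (x : String) :
    (if c + 1 ≤ thr then [x] else []) ++ List.replicate (min (L : Int) (thr - (c + 1))).toNat x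
      = List.replicate (min ((L : Int) + 1) (thr - c)).toNat x := by
  split_ifs with h
  · have hk : (min ((L : Int) + 1) (thr - c)).toNat = (min (L : Int) (thr - (c + 1))).toNat + 1 := by
      omega
    rw [hk, List.replicate_succ, List.singleton_append]
  · have h1 : (min ((L : Int) + 1) (thr - c)).toNat = 0 := by omega
    have h2 : (min (L : Int) (thr - (c + 1))).toNat = 0 := by omega
    simp [h1, h2]

lemma pvGo_span (thr : Int) : ∀ (ls : List String) (x : String) (c : Int),
    pvGo thr x c ls
      = List.replicate (min ((ls.takeWhile (· == x)).length : Int) (thr - c)).toNat x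
          ++ pvFlat thr (pvRuns (ls.dropWhile (· == x))) := by
  intro ls
  induction ls with
  | nil =>
      intro x c
      have : (min ((0 : Nat) : Int) (thr - c)).toNat = 0 := by omega
      simp [pvGo, pvRuns, pvFlat]
  | cons y ys ih =>
      intro x c
      by_cases hyx : y = x
      · subst hyx
        have htw : ((y :: ys).takeWhile (· == y)) = y :: ys.takeWhile (· == y) := by
          simp
        have hdw : ((y :: ys).dropWhile (· == y)) = ys.dropWhile (· == y) := by
          simp
        rw [htw, hdw]
        simp only [pvGo, if_true]
        rw [ih y (c + 1)]
        rw [← List.append_assoc, pvRepArith thr c]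
        simp [List.length_cons]
      · have hb : (y == x) = false := by simp [hyx]
        have htw : ((y :: ys).takeWhile (· == x)) = [] := by simp [hb]
        have hdw : ((y :: ys).dropWhile (· == x)) = y :: ys := by simp [hb]
        rw [htw, hdw]
        have h0 : (min ((0 : Nat) : Int) (thr - c)).toNat = 0 := by omega
        simp only [pvGo, if_neg hyx]
        rw [ih y 1]
        rw [pvRuns]
        simp only [pvFlat, List.flatMap_cons, h0, List.length_nil, List.replicate_zero,
          List.nil_append]
        rw [← List.append_assoc]
        have := pvRepArith thr 0 ((ys.takeWhile (· == y)).length) y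
        simp only [zero_add, sub_zero] at this
        rw [this]
        rw [← pvFlat]
        push_cast
        ring_nf

-- A's whole loop over a nonempty line list equals B's run-based output
lemma pvLoopA_eq (thr : Int) (a : String) (xs : List String) :
    (if (1 : Int) ≤ thr then [a] else []) ++ pvGo thr a 1 xs = pvFlat thr (pvRuns (a :: xs)) := by
  rw [pvGo_span thr xs a 1, pvRuns]
  simp only [pvFlat, List.flatMap_cons]
  rw [← List.append_assoc]
  have := pvRepArith thr 0 ((xs.takeWhile (· == a)).length) a
  simp only [zero_add, sub_zero] at this
  rw [this, ← pvFlat]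
  push_cast
  ring_nf

-- the enumerate/index fold of A, from position k+1 on, equals pvGo with the previous line carried
lemma pvFoldA_suffix (thr : Int) (lines : List String) :
    ∀ (suf : List String) (k : Nat) (prev : String) (acc : List String) (c : Int),
      lines.drop k = prev :: suf →
      ((PySem.List.enumerate suf ((k : Int) + 1)).foldl (pvStepA lines thr) (acc, c)).1
        = acc ++ pvGo thr prev c suf := by
  intro suf
  induction suf with
  | nil => intro k prev acc c _; simp [PySem.List.enumerate, pvGo]
  | cons x rest ih =>
      intro k prev acc c hdrop
      have hk : lines[k]? = some prev := by
        have : (lines.drop k)[0]? = some prev := by rw [hdrop]; rfl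
        simpa using this
      have hdrop' : lines.drop (k + 1) = x :: rest := by
        have : (lines.drop k).drop 1 = x :: rest := by rw [hdrop]; rfl
        simpa [List.drop_drop] using this
      rw [PySem.List.enumerate_cons, List.foldl_cons]
      have hget : PySem.List.pyGet? lines ((k : Int) + 1 - 1) = some prev := by
        have : ((k : Int) + 1 - 1) = (k : Int) := by ring
        rw [this, PySem.List.pyGet?_natCast, hk]
      have hstep : pvStepA lines thr (acc, c) ((k : Int) + 1, x)
          = (acc ++ (if (if x = prev then c + 1 else 1) ≤ thr then [x] else []),
             if x = prev then c + 1 else 1) := by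
        simp only [pvStepA, hget]
        have hpos : (0 : Int) < (k : Int) + 1 := by positivity
        by_cases hxp : x = prev
        · simp [hxp, hpos]
          split_ifs <;> simp
        · have : ¬ (0 < (k : Int) + 1 ∧ some prev = some x) := by
            intro ⟨_, h⟩; exact hxp (Option.some.inj h).symm
          simp only [if_neg this]
          split_ifs <;> simp
      rw [hstep]
      have := ih (k + 1) x (acc ++ (if (if x = prev then c + 1 else 1) ≤ thr then [x] else []))
        (if x = prev then c + 1 else 1) hdrop'
      push_cast at this ⊢
      rw [show ((k : Int) + 1 + 1) = ((k : Int) + 1) + 1 by ring] at this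
      rw [this]
      simp [pvGo, List.append_assoc]

-- B's foldl-with-extend is pvFlat
lemma pvAltList (thr : Int) (rs : List (String × Nat)) :
    rs.foldl (fun acc p => acc ++ List.replicate (min ((p.2 : Int)) thr).toNat p.1) ([] : List String)
      = pvFlat thr rs := by
  rw [PySem.List.foldl_append_eq_flatMap]
  simp [pvFlat]

-- ===== VERDICT (by name: the statement is the Claim_ definition above) =====
theorem deduplicate_repeated_lines_spec : Claim_equal_deduplicate_repeated_lines := by
  intro text thr _
  unfold Spec_deduplicate_repeated_lines deduplicate_repeated_lines deduplicate_repeated_lines_alt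
  dsimp only
  rw [pvAltList]
  generalize pvSplitLines text = ls
  cases ls with
  | nil => simp [PySem.List.enumerate, pvRuns, pvFlat]
  | cons a xs =>
      congr 1
      rw [PySem.List.enumerate_cons, List.foldl_cons]
      have hstep0 : pvStepA (a :: xs) thr ([], 1) ((0 : Int), a)
          = ((if (1 : Int) ≤ thr then [a] else []), 1) := by
        simp only [pvStepA]
        have : ¬ ((0 : Int) < 0 ∧ PySem.List.pyGet? (a :: xs) ((0 : Int) - 1) = some a) := by
          intro ⟨h, _⟩; omega
        simp only [if_neg this]
        split_ifs <;> simp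
      rw [hstep0]
      have := pvFoldA_suffix thr (a :: xs) xs 0 a (if (1 : Int) ≤ thr then [a] else []) 1 (by simp)
      simp only [Nat.cast_zero, zero_add] at this
      norm_num
      rw [this, pvLoopA_eq]
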